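-- pv_equiv track=rewrite | github.com/sakuralggm/algorithm_training | bytedance/最大UCC子串计算.py | solution
-- ===== SOURCE A (Python) =====
-- def solution(m: int, s: str) -> int:
--     res, n = 0, 0
--     i = 0
--     length = len(s)
--     while i < length:
--         if (
--             s[i : i + 3] == "UCC"
--         ):  # 这里的判断条件可以更简洁，不用每次都判断i是否越界 因为如果i+3越界的话，s[i:i+3]得到的是s[i:]，不会报错，也不会等于'UCC'
--             res += 1
--             i += 3
--         elif s[i : i + 2] == "UC" or s[i : i + 2] == "CC":
--             n += 1
--             i += 2
--         else:
--             i += 1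
--
--     # 优化的写法，更简洁，但是不容易理解
--     ans = res + min(n, m)
--     m = max(0, m - n)
--     remaining = length - res * 3 - n * 2
--     ans += min(remaining, m // 2)
--     m = max(0, m - remaining * 2)  # m -= min(m, remaining * 2) 也可以
--     ans += m // 3
--     """
--     ans = res
--     if n >= m:
--         ans += m
--     else:
--         ans += n
--         m -= n
--         twice = len(s) - res * 3 - n * 2
--         if m >= twice * 2:
--             ans += twice
--             m -= twice * 2
--             ans += m // 3
--         else:
--             ans += m // 2
--     """
--     return ans
-- ===== SOURCE B (Python) =====
-- def _pairs(p: str) -> int: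
--     c = 0
--     i = 0
--     while i < len(p):
--         if p[i : i + 2] in ("UC", "CC"):
--             c += 1
--             i += 2
--         else:
--             i += 1
--     return c
--
--
-- def solution(m: int, s: str) -> int:
--     parts = s.split("UCC")
--     res = len(parts) - 1
--     n = sum(_pairs(p) for p in parts)
--     ans = res + min(n, m)
--     m = max(0, m - n)
--     remaining = len(s) - res * 3 - n * 2
--     ans += min(remaining, m // 2)
--     m = max(0, m - remaining * 2)
--     ans += m // 3
--     return ans
-- ===== Notes on version B (the rewrite author's own statement) =====
-- stated objective: alternative
-- what changed: Replaces the single stateful index-advancing scan with a decomposition: split the string on greedy non-overlapping 'UCC' matches via str.split (res = len(parts)-1), count 'UC'/'CC' pairs inside each fragment separately, then apply the same closing arithmetic.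
import Mathlib
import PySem

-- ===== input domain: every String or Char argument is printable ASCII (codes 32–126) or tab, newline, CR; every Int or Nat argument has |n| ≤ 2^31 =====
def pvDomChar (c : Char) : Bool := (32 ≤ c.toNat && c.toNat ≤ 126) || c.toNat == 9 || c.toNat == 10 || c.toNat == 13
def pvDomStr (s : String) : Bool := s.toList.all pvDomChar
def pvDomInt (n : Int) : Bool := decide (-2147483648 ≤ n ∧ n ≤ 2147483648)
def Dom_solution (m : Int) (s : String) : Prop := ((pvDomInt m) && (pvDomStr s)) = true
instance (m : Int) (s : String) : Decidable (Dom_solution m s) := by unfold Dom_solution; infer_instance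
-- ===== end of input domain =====

-- B replaces A's single stateful index-advancing scan by a split-on-'UCC' decomposition
-- plus a per-fragment pair count; same closing arithmetic, same return value (objective: alternative).

-- ===== PORT A =====
-- A's while loop over index i with the three branches, state (res, n); i only grows from 0, so it is a Nat.
def solutionLoop (cs : List Char) (i : Nat) (res n : Int) : Int × Int :=
  if i < cs.length then
    if PySem.List.slice cs (some (i : Int)) (some ((i : Int) + 3)) = ['U', 'C', 'C'] then
      solutionLoop cs (i + 3) (res + 1) n
    else if PySem.List.slice cs (some (i : Int)) (some ((i : Int) + 2)) = ['U', 'C'] ∨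
            PySem.List.slice cs (some (i : Int)) (some ((i : Int) + 2)) = ['C', 'C'] then
      solutionLoop cs (i + 2) res (n + 1)
    else
      solutionLoop cs (i + 1) res n
  else (res, n)
termination_by cs.length - i

def solution (m : Int) (s : String) : Int :=
  let cs := s.toList
  let length : Int := PySem.Str.len s
  let rn := solutionLoop cs 0 0 0
  let res := rn.1
  let n := rn.2
  let ans := res + min n m
  let m1 := max 0 (m - n)
  let remaining := length - res * 3 - n * 2
  let ans2 := ans + min remaining (PySem.Int.floordiv m1 2)
  let m2 := max 0 (m1 - remaining * 2)
  ans2 + PySem.Int.floordiv m2 3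

-- ===== PORT B =====
-- _pairs: Source B's while loop over index i inside one fragment.
def pairsLoop (p : List Char) (c : Int) (i : Nat) : Int :=
  if i < p.length then
    if PySem.List.slice p (some (i : Int)) (some ((i : Int) + 2)) = ['U', 'C'] ∨
       PySem.List.slice p (some (i : Int)) (some ((i : Int) + 2)) = ['C', 'C'] then
      pairsLoop p (c + 1) (i + 2)
    else
      pairsLoop p c (i + 1)
  else c
termination_by p.length - i

def pairsB (p : List Char) : Int := pairsLoop p 0 0

def solution_alt (m : Int) (s : String) : Int :=
  let parts := PySem.Chars.splitOn s.toList ['U', 'C', 'C']   -- s.split("UCC")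
  let res : Int := (parts.length : Int) - 1
  let n : Int := (parts.map pairsB).sum
  let ans := res + min n m
  let m1 := max 0 (m - n)
  let remaining := PySem.Str.len s - res * 3 - n * 2
  let ans2 := ans + min remaining (PySem.Int.floordiv m1 2)
  let m2 := max 0 (m1 - remaining * 2)
  ans2 + PySem.Int.floordiv m2 3

-- ===== PRECONDITION & SPEC =====
def Spec_solution (m : Int) (s : String) (out : Int) : Prop := out = solution_alt m s
instance (m : Int) (s : String) (out : Int) : Decidable (Spec_solution m s out) := by unfold Spec_solution; infer_instance

-- ===== CLAIM (what is proved, stated in full; the proofs are below) =====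
def Claim_equal_solution : Prop := ∀ (m : Int) (s : String), Dom_solution m s → Spec_solution m s (solution m s)

-- ===== LEMMAS AND PROOFS =====

-- proof-only helpers: a clean structural splitter equal to PySem.Chars.splitOn on sep "UCC",
-- and a clean structural form of the pair scan.

def consHead (x : List Char) : List (List Char) → List (List Char)
  | [] => [x]
  | h :: r => (x ++ h) :: r

def splitRecUCC : List Char → List (List Char)
  | [] => [[]]
  | c :: rest =>
    if ['U', 'C', 'C'].isPrefixOf (c :: rest) then [] :: splitRecUCC (rest.drop 2)
    else consHead [c] (splitRecUCC rest)
termination_by l => l.length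
decreasing_by
  · simp only [List.length_cons, List.length_drop]
    omega
  · simp

def pairsRec : List Char → Int
  | [] => 0
  | a :: t =>
    if (a :: t).take 2 = ['U', 'C'] ∨ (a :: t).take 2 = ['C', 'C'] then 1 + pairsRec (t.drop 1)
    else pairsRec t
termination_by l => l.length
decreasing_by
  · simp only [List.length_cons, List.length_drop]
    omega
  · simp

lemma consHead_ne_nil (x : List Char) (sp : List (List Char)) : consHead x sp ≠ [] := by
  cases sp <;> simp [consHead]

lemma consHead_nil (sp : List (List Char)) (h : sp ≠ []) : consHead [] sp = sp := by
  cases sp with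
  | nil => exact absurd rfl h
  | cons a r => simp [consHead]

lemma consHead_consHead (x y : List Char) (sp : List (List Char)) :
    consHead x (consHead y sp) = consHead (x ++ y) sp := by
  cases sp <;> simp [consHead]

lemma splitRecUCC_ne_nil (l : List Char) : splitRecUCC l ≠ [] := by
  cases l with
  | nil => simp [splitRecUCC]
  | cons c rest =>
    rw [splitRecUCC]
    split
    · simp
    · exact consHead_ne_nil _ _

lemma splitRecUCC_head_prefix : ∀ (l : List Char) (h : List Char) (r : List (List Char)),
    splitRecUCC l = h :: r → h <+: l := by
  intro l
  induction l using splitRecUCC.induct with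
  | case1 =>
    intro h r he
    simp [splitRecUCC] at he
    simp [he.1]
  | case2 c rest hpre ih =>
    intro h r he
    rw [splitRecUCC, if_pos hpre] at he
    obtain ⟨rfl, -⟩ := List.cons.injEq .. ▸ he
    exact List.nil_prefix
  | case3 c rest hpre ih =>
    intro h r he
    rw [splitRecUCC, if_neg hpre] at he
    obtain ⟨h0, r0, hsp⟩ : ∃ h0 r0, splitRecUCC rest = h0 :: r0 := by
      rcases hx : splitRecUCC rest with _ | ⟨h0, r0⟩
      · exact absurd hx (splitRecUCC_ne_nil rest)
      · exact ⟨h0, r0, rfl⟩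
    rw [hsp] at he
    simp only [consHead, List.cons.injEq] at he
    obtain ⟨rfl, -⟩ := he
    exact List.cons_prefix_cons.mpr ⟨rfl, ih h0 r0 hsp⟩

-- "take 3 = UCC" is exactly prefix-of for the three-letter pattern
lemma isPrefixOf_UCC_iff (l : List Char) :
    ['U', 'C', 'C'].isPrefixOf l = true ↔ l.take 3 = ['U', 'C', 'C'] := by
  rw [List.isPrefixOf_iff_prefix, List.prefix_iff_eq_take]
  constructor <;> (intro h; simpa using h.symm)

-- slices with Nat-cast bounds are drop-then-take
lemma slice_nat (cs : List Char) (i k : Nat) :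
    PySem.List.slice cs (some (i : Int)) (some ((i : Int) + (k : Int))) = (cs.drop i).take k := by
  rw [PySem.List.slice_toNat cs (a := (i : Int)) (b := (i : Int) + (k : Int)) (by positivity)
    (by positivity), show ((i : Int) + (k : Int)).toNat = i + k by omega,
    show ((i : Int)).toNat = i by omega]
  congr 1
  omega

-- the characterisation of PySem.Chars.splitOn.go for sep = "UCC"
lemma splitOn_go_spec : ∀ (fuel : Nat) (l cur : List Char) (acc : List (List Char)),
    l.length < fuel →
    PySem.Chars.splitOn.go ['U', 'C', 'C'] fuel l cur acc
      = acc.reverse ++ consHead cur.reverse (splitRecUCC l) := by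
  intro fuel
  induction fuel with
  | zero => intro l cur acc h; omega
  | succ fuel ih =>
    intro l cur acc h
    cases l with
    | nil =>
      simp [PySem.Chars.splitOn.go, splitRecUCC, consHead]
    | cons c rest =>
      rw [PySem.Chars.splitOn.go]
      by_cases hpre : ['U', 'C', 'C'].isPrefixOf (c :: rest) = true
      · rw [if_pos hpre, ih _ _ _ (by simp at h ⊢; omega)]
        rw [splitRecUCC, if_pos hpre]
        have hdl : List.drop (['U', 'C', 'C'] : List Char).length (c :: rest) = rest.drop 2 := by
          simp
        rw [hdl, List.reverse_nil, consHead_nil _ (splitRecUCC_ne_nil _)]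
        rcases hx : splitRecUCC (rest.drop 2) with _ | ⟨h0, r0⟩
        · exact absurd hx (splitRecUCC_ne_nil _)
        · simp [consHead]
      · rw [if_neg hpre, ih _ _ _ (by simp at h ⊢; omega)]
        rw [splitRecUCC, if_neg hpre, consHead_consHead]
        simp

lemma splitOn_eq (l : List Char) :
    PySem.Chars.splitOn l ['U', 'C', 'C'] = splitRecUCC l := by
  rw [PySem.Chars.splitOn, splitOn_go_spec (l.length + 1) l [] [] (by omega)]
  simp [consHead_nil _ (splitRecUCC_ne_nil l)]

-- Source B's _pairs loop computes pairsRec of the remaining suffix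
lemma pairsLoop_eq (p : List Char) : ∀ (k i : Nat) (c : Int), p.length - i ≤ k →
    pairsLoop p c i = c + pairsRec (p.drop i) := by
  intro k
  induction k with
  | zero =>
    intro i c h
    rw [pairsLoop, if_neg (by omega), List.drop_of_length_le (by omega)]
    simp [pairsRec]
  | succ k ih =>
    intro i c h
    rw [pairsLoop]
    by_cases hi : i < p.length
    · rw [if_pos hi]
      rcases hd : p.drop i with _ | ⟨a, t⟩
      · rw [List.drop_eq_nil_iff] at hd; omega
      have htake : PySem.List.slice p (some (i : Int)) (some ((i : Int) + 2)) = (a :: t).take 2 := by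
        rw [show ((i : Int) + 2) = ((i : Int) + ((2 : Nat) : Int)) by norm_num, slice_nat, hd]
      by_cases h2 : (a :: t).take 2 = ['U', 'C'] ∨ (a :: t).take 2 = ['C', 'C']
      · rw [if_pos (by rw [htake]; exact h2)]
        rw [ih (i + 2) (c + 1) (by omega)]
        have hdrop : p.drop (i + 2) = t.drop 1 := by
          have h' : List.drop 2 (List.drop i p) = p.drop (i + 2) := List.drop_drop
          rw [← h', hd]
          simp
        rw [hdrop, pairsRec, if_pos h2]
        ring
      · rw [if_neg (by rw [htake]; exact h2)]
        rw [ih (i + 1) c (by omega)]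
        have hdrop : p.drop (i + 1) = t := by
          have h' : List.drop 1 (List.drop i p) = p.drop (i + 1) := List.drop_drop
          rw [← h', hd]
          simp
        rw [hdrop, pairsRec, if_neg h2]
    · rw [if_neg hi, List.drop_of_length_le (by omega)]
      simp [pairsRec]

lemma pairsB_eq (p : List Char) : pairsB p = pairsRec p := by
  rw [pairsB, pairsLoop_eq p p.length 0 0 (by omega)]
  simp

-- in the skip case, prepending the skipped character to the first fragment does not add a pair
lemma pairsRec_cons_head (a : Char) (t h : List Char)
    (hpre : h <+: t)
    (hno : ¬((a :: t).take 2 = ['U', 'C'] ∨ (a :: t).take 2 = ['C', 'C'])) :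
    pairsRec (a :: h) = pairsRec h := by
  cases h with
  | nil => simp [pairsRec]
  | cons x h' =>
    obtain ⟨t', rfl⟩ := hpre
    rw [pairsRec, if_neg (by simpa using hno)]

-- A's loop state equals (res, n) derived from the split of the remaining suffix
lemma solutionLoop_eq (cs : List Char) : ∀ (k i : Nat) (res n : Int), cs.length - i ≤ k →
    solutionLoop cs i res n
      = (res + ((splitRecUCC (cs.drop i)).length : Int) - 1,
         n + ((splitRecUCC (cs.drop i)).map pairsRec).sum) := by
  intro k
  induction k with
  | zero =>
    intro i res n h
    rw [solutionLoop, if_neg (by omega), List.drop_of_length_le (by omega)]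
    simp [splitRecUCC, pairsRec]
  | succ k ih =>
    intro i res n h
    by_cases hi : i < cs.length
    · rw [solutionLoop, if_pos hi]
      rcases hd : cs.drop i with _ | ⟨a, t⟩
      · rw [List.drop_eq_nil_iff] at hd; omega
      have htake3 : PySem.List.slice cs (some (i : Int)) (some ((i : Int) + 3)) = (a :: t).take 3 := by
        rw [show ((i : Int) + 3) = ((i : Int) + ((3 : Nat) : Int)) by norm_num, slice_nat, hd]
      have htake2 : PySem.List.slice cs (some (i : Int)) (some ((i : Int) + 2)) = (a :: t).take 2 := by
        rw [show ((i : Int) + 2) = ((i : Int) + ((2 : Nat) : Int)) by norm_num, slice_nat, hd]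
      by_cases h3 : (a :: t).take 3 = ['U', 'C', 'C']
      · rw [if_pos (by rw [htake3]; exact h3)]
        rw [ih (i + 3) (res + 1) n (by omega)]
        have hdrop : cs.drop (i + 3) = t.drop 2 := by
          have h' : List.drop 3 (List.drop i cs) = cs.drop (i + 3) := List.drop_drop
          rw [← h', hd]
          simp
        rw [hdrop]
        rw [show splitRecUCC (a :: t) = [] :: splitRecUCC (t.drop 2) from by
          rw [splitRecUCC, if_pos ((isPrefixOf_UCC_iff _).2 h3)]]
        simp only [List.length_cons, List.map_cons, List.sum_cons]
        refine Prod.ext ?_ ?_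
        · push_cast; ring
        · simp [pairsRec]
      · rw [if_neg (by rw [htake3]; exact h3)]
        by_cases h2 : (a :: t).take 2 = ['U', 'C'] ∨ (a :: t).take 2 = ['C', 'C']
        · rw [if_pos (by rw [htake2]; exact h2)]
          obtain ⟨t', rfl, hC⟩ : ∃ t', t = 'C' :: t' ∧ (a = 'U' ∨ a = 'C') := by
            rcases h2 with h2 | h2 <;> (cases t with
              | nil => simp at h2
              | cons b t' => simp at h2; exact ⟨t', by simp [h2], by simp [h2]⟩)
          rw [ih (i + 2) res (n + 1) (by omega)]
          have hdrop : cs.drop (i + 2) = t' := by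
            have h' : List.drop 2 (List.drop i cs) = cs.drop (i + 2) := List.drop_drop
            rw [← h', hd]
            simp
          rw [hdrop]
          have hsp : splitRecUCC (a :: 'C' :: t') = consHead [a, 'C'] (splitRecUCC t') := by
            rw [splitRecUCC, if_neg (by rw [isPrefixOf_UCC_iff]; exact h3)]
            rw [splitRecUCC, if_neg (by rw [isPrefixOf_UCC_iff]; simp)]
            rw [consHead_consHead]
            rfl
          rcases hx : splitRecUCC t' with _ | ⟨h0, r0⟩
          · exact absurd hx (splitRecUCC_ne_nil _)
          rw [hsp, hx]
          simp only [consHead, List.length_cons, List.map_cons, List.sum_cons]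
          have hp : pairsRec ([a, 'C'] ++ h0) = 1 + pairsRec h0 := by
            rw [show ([a, 'C'] ++ h0) = a :: 'C' :: h0 from rfl, pairsRec,
              if_pos (by rcases h2 with h2 | h2 <;> simp_all), List.drop_one]
            rfl
          refine Prod.ext ?_ ?_
          · push_cast; ring
          · rw [hp]; ring
        · rw [if_neg (by rw [htake2]; exact h2)]
          rw [ih (i + 1) res n (by omega)]
          have hdrop : cs.drop (i + 1) = t := by
            have h' : List.drop 1 (List.drop i cs) = cs.drop (i + 1) := List.drop_drop
            rw [← h', hd]
            simp
          rw [hdrop]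
          have hspl : splitRecUCC (a :: t) = consHead [a] (splitRecUCC t) := by
            rw [splitRecUCC, if_neg (by rw [isPrefixOf_UCC_iff]; exact h3)]
          rcases hx : splitRecUCC t with _ | ⟨h0, r0⟩
          · exact absurd hx (splitRecUCC_ne_nil _)
          rw [hspl, hx]
          simp only [consHead, List.length_cons, List.map_cons, List.sum_cons, List.cons_append,
            List.nil_append]
          rw [pairsRec_cons_head a t h0 (splitRecUCC_head_prefix t h0 r0 hx) h2]
    · rw [solutionLoop, if_neg hi, List.drop_of_length_le (by omega)]
      simp [splitRecUCC, pairsRec]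

-- ===== VERDICT (by name: the statement is the Claim_ definition above) =====
theorem solution_spec : Claim_equal_solution := by
  unfold Claim_equal_solution
  intro m s _
  show solution m s = solution_alt m s
  simp only [solution, solution_alt]
  rw [solutionLoop_eq s.toList s.toList.length 0 0 0 (by omega)]
  simp only [List.drop_zero, splitOn_eq]
  have hmap : (splitRecUCC s.toList).map pairsB = (splitRecUCC s.toList).map pairsRec :=
    List.map_congr_left (fun p _ => pairsB_eq p)
  rw [hmap]
  simp only [zero_add]
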